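-- pv_equiv track=rewrite | github.com/rsumner33/urh | src/urh/signalprocessing/encoding.py | bit2str
-- ===== SOURCE A (Python) =====
-- def bit2str(inpt, points=False):
--     if not points:
--         return "".join(["1" if x else "0" for x in inpt])
--     else:
--         bitstring = ""
--         for i in range(0, len(inpt)):
--             if i > 0 and i % 4 == 0:
--                 bitstring += "."
--             if inpt[i]:
--                 bitstring += "1"
--             else:
--                 bitstring += "0"
--         return bitstring
-- ===== SOURCE B (Python) =====
-- def bit2str(inpt, points=False):
--     s = "".join("1" if x else "0" for x in inpt)
--     if not points:
--         return s
--     return ".".join(s[i:i + 4] for i in range(0, len(s), 4))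
-- ===== Notes on version B (the rewrite author's own statement) =====
-- stated objective: simpler
-- what changed: Replaces the interleaved index loop (which tests i%4==0 and emits dots inline while building the string) with a two-pass compute-then-chunk structure: build the full bit string once, then regroup it as '.'.join of 4-character slices.
import Mathlib
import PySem

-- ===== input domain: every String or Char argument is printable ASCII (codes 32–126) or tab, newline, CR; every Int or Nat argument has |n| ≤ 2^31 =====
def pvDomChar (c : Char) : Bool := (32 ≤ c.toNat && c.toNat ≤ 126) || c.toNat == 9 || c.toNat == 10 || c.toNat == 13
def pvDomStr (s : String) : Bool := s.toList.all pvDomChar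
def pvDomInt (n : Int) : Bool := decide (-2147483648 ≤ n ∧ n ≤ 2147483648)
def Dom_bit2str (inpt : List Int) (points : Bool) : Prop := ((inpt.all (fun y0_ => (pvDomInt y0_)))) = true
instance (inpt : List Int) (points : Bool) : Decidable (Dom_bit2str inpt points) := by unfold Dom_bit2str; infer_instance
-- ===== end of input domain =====

-- B replaces A's interleaved index loop (dot test i%4==0 inline) with a two-pass
-- compute-then-chunk decomposition: build the bit string, then '.'-join its 4-char slices. (objective: simpler)

-- ===== PORT A =====
def bit2str (inpt : List Int) (points : Bool) : String :=
  if !points then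
    PySem.Str.join "" (inpt.map (fun x => if x ≠ 0 then "1" else "0"))
  else
    (PySem.List.pyRange 0 (PySem.List.len inpt) 1).foldl
      (fun bitstring i =>
        let bitstring := if 0 < i ∧ PySem.Int.mod i 4 = 0 then bitstring ++ "." else bitstring
        if PySem.List.pyGetD inpt i 0 ≠ 0 then bitstring ++ "1" else bitstring ++ "0")
      ""

-- ===== PORT B =====
def bit2str_alt (inpt : List Int) (points : Bool) : String :=
  let s := PySem.Str.join "" (inpt.map (fun x => if x ≠ 0 then "1" else "0"))
  if !points then s
  else
    PySem.Str.join "."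
      ((PySem.List.pyRange 0 (PySem.Str.len s) 4).map
        (fun i => PySem.Str.slice s (some i) (some (i + 4))))

-- ===== PRECONDITION & SPEC =====
def Spec_bit2str (inpt : List Int) (points : Bool) (out : String) : Prop := out = bit2str_alt inpt points
instance (inpt : List Int) (points : Bool) (out : String) : Decidable (Spec_bit2str inpt points out) := by unfold Spec_bit2str; infer_instance

-- ===== CLAIM (what is proved, stated in full; the proofs are below) =====
def Claim_equal_bit2str : Prop := ∀ (inpt : List Int) (points : Bool), Dom_bit2str inpt points → Spec_bit2str inpt points (bit2str inpt points)

-- ===== LEMMAS AND PROOFS =====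

-- one bit as a character
def pvBit (x : Int) : Char := if x ≠ 0 then '1' else '0'

-- what A's loop emits starting at index k
def pvD (k : Int) (cs : List Char) : List Char :=
  match cs with
  | [] => []
  | c :: rest => (if 0 < k ∧ PySem.Int.mod k 4 = 0 then ['.'] else []) ++ c :: pvD (k + 1) rest

-- 4-character chunks of a list
def pvChunks (cs : List Char) : List (List Char) :=
  match cs with
  | [] => []
  | c :: rest => (c :: rest).take 4 :: pvChunks ((c :: rest).drop 4)
termination_by cs.length
decreasing_by simp only [List.length_drop, List.length_cons]; omega

theorem pvChunks_nil : pvChunks [] = [] := pvChunks.eq_1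

theorem pvChunks_cons (c : Char) (rest : List Char) :
    pvChunks (c :: rest) = (c :: rest).take 4 :: pvChunks ((c :: rest).drop 4) :=
  pvChunks.eq_2 c rest

theorem pvChunks_ne_nil (cs : List Char) (h : cs ≠ []) : pvChunks cs ≠ [] := by
  match cs with
  | c :: rest => rw [pvChunks_cons]; simp

-- A's loop body over (index, element) pairs
def pvF (bs : String) (p : Int × Int) : String :=
  let bs := if 0 < p.1 ∧ PySem.Int.mod p.1 4 = 0 then bs ++ "." else bs
  if p.2 ≠ 0 then bs ++ "1" else bs ++ "0"

theorem pvFoldA (xs : List Int) :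
    ∀ (k : Int) (acc : String),
      ((PySem.List.enumerate xs k).foldl pvF acc).toList = acc.toList ++ pvD k (xs.map pvBit) := by
  induction xs with
  | nil => intro k acc; simp [PySem.List.enumerate, pvD]
  | cons x xs ih =>
      intro k acc
      rw [PySem.List.enumerate_cons, List.foldl_cons, ih]
      have hbody : (pvF acc (k, x)).toList
          = acc.toList ++ ((if 0 < k ∧ PySem.Int.mod k 4 = 0 then ['.'] else []) ++ [pvBit x]) := by
        simp only [pvF, pvBit]
        split_ifs <;> simp
      rw [hbody, List.map_cons,
        show pvD k (pvBit x :: xs.map pvBit)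
            = (if 0 < k ∧ PySem.Int.mod k 4 = 0 then ['.'] else [])
                ++ pvBit x :: pvD (k + 1) (xs.map pvBit) from rfl]
      simp

theorem pvD_nil (k : Int) : pvD k [] = [] := rfl

theorem pvD_step (k : Int) (hk : 0 ≤ k) (h4 : k % 4 = 0) (cs : List Char) :
    pvD k cs = (if 0 < k ∧ cs ≠ [] then ['.'] else []) ++ cs.take 4 ++ pvD (k + 4) (cs.drop 4) := by
  have d0 : (4:Int) ∣ k := by omega
  have d1 : ¬ (4:Int) ∣ (k + 1) := by omega
  have d2 : ¬ (4:Int) ∣ (k + 1 + 1) := by omega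
  have d3 : ¬ (4:Int) ∣ (k + 1 + 1 + 1) := by omega
  have e4 : k + 1 + 1 + 1 + 1 = k + 4 := by ring
  match cs with
  | [] => simp [pvD]
  | [a] => by_cases hp : 0 < k <;> simp [pvD, hp, d0]
  | [a, b] => by_cases hp : 0 < k <;> simp [pvD, hp, hk, d0, d1]
  | [a, b, c] => by_cases hp : 0 < k <;> simp [pvD, hp, hk, d0, d1, d2]
  | a :: b :: c :: d :: es =>
      by_cases hp : 0 < k <;> simp [pvD, hp, hk, d0, d1, d2, d3, e4]

theorem pvD_pos (n : Nat) : ∀ (cs : List Char), cs.length ≤ n → ∀ (k : Int), 0 < k → k % 4 = 0 →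
    pvD k cs = if cs = [] then [] else '.' :: PySem.Chars.join ['.'] (pvChunks cs) := by
  induction n with
  | zero =>
      intro cs hlen k hk h4
      have hnil : cs = [] := by cases cs <;> simp_all
      simp [hnil, pvD_nil]
  | succ n ih =>
      intro cs hlen k hk h4
      rcases cs with _ | ⟨c, rest⟩
      · simp [pvD_nil]
      · have hcs : (c :: rest) ≠ [] := by simp
        rw [pvD_step k (le_of_lt hk) h4 (c :: rest), if_pos ⟨hk, hcs⟩,
          if_neg hcs, pvChunks_cons]
        rcases hdrop : (c :: rest).drop 4 with _ | ⟨d, ds⟩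
        · rw [pvChunks_nil, PySem.Chars.join_singleton, pvD_nil]
          simp
        · have hlen2 : (d :: ds).length ≤ n := by
            have hl := congrArg List.length hdrop
            simp only [List.length_drop, List.length_cons] at hl hlen ⊢
            omega
          rw [ih (d :: ds) hlen2 (k + 4) (by omega) (by omega), if_neg (by simp)]
          rcases hch : pvChunks (d :: ds) with _ | ⟨p, ps⟩
          · exact absurd hch (pvChunks_ne_nil _ (by simp))
          · rw [PySem.Chars.join_cons_cons]
            simp

theorem pvD_zero (cs : List Char) : pvD 0 cs = PySem.Chars.join ['.'] (pvChunks cs) := by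
  rw [pvD_step 0 le_rfl (by decide) cs, if_neg (by simp), List.nil_append]
  rcases cs with _ | ⟨c, rest⟩
  · simp [pvD_nil, pvChunks_nil]
  · rw [pvChunks_cons]
    rcases hdrop : (c :: rest).drop 4 with _ | ⟨d, ds⟩
    · rw [pvChunks_nil, PySem.Chars.join_singleton, pvD_nil]
      simp
    · rw [pvD_pos (d :: ds).length (d :: ds) le_rfl (0 + 4) (by omega) (by decide),
        if_neg (by simp)]
      rcases hch : pvChunks (d :: ds) with _ | ⟨p, ps⟩
      · exact absurd hch (pvChunks_ne_nil _ (by simp))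
      · rw [PySem.Chars.join_cons_cons]
        simp

theorem pvMapRange {alpha : Type} (m : Nat) (f : Nat → alpha) :
    List.map f (List.range (m + 1)) = f 0 :: List.map (f ∘ Nat.succ) (List.range m) := by
  rw [List.range_succ_eq_map, List.map_cons, List.map_map]

-- B's slice comprehension computes pvChunks
theorem pvSlices (n : Nat) : ∀ (cs : List Char), cs.length ≤ n →
    (PySem.List.pyRange 0 (cs.length : Int) 4).map
        (fun i => PySem.List.slice cs (some i) (some (i + 4))) = pvChunks cs := by
  induction n with
  | zero =>
      intro cs hlen
      have hnil : cs = [] := by cases cs <;> simp_all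
      subst hnil
      simp [PySem.List.pyRange_of_pos 0 0 (by omega : (0:Int) < 4), pvChunks_nil]
  | succ n ih =>
      intro cs hlen
      rcases cs with _ | ⟨c, rest⟩
      · simp [PySem.List.pyRange_of_pos 0 0 (by omega : (0:Int) < 4), pvChunks_nil]
      · have hLpos : 0 < (c :: rest).length := by simp
        rw [PySem.List.pyRange_of_pos 0 ((c :: rest).length : Int) (by omega : (0:Int) < 4),
          List.map_map]
        have h1 : (if (0:Int) < ((c :: rest).length : Int)
            then ((((c :: rest).length : Int) - 0 + 4 - 1) / 4).toNat else 0)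
            = ((c :: rest).length + 3) / 4 := by
          rw [if_pos (by exact_mod_cast hLpos)]; omega
        have hm : ((c :: rest).length + 3) / 4 = (((c :: rest).length + 3) / 4 - 1) + 1 := by
          omega
        rw [h1, hm, pvMapRange, pvChunks_cons]
        congr 1
        · show PySem.List.slice (c :: rest) (some ((0:Int) + 4 * ((0:Nat):Int)))
              (some ((0:Int) + 4 * ((0:Nat):Int) + 4)) = (c :: rest).take 4
          have e1 : (0:Int) + 4 * ((0:Nat):Int) = ((0:Nat):Int) := by norm_num
          have e2 : (0:Int) + 4 * ((0:Nat):Int) + 4 = ((0:Nat):Int) + ((4:Nat):Int) := by norm_num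
          rw [e2, e1, PySem.List.slice_natCast_add]
          simp
        · have hlen2 : ((c :: rest).drop 4).length ≤ n := by
            simp at hlen ⊢; omega
          have hrec := ih ((c :: rest).drop 4) hlen2
          rw [PySem.List.pyRange_of_pos 0 (((c :: rest).drop 4).length : Int)
            (by omega : (0:Int) < 4), List.map_map] at hrec
          have h2 : (if (0:Int) < (((c :: rest).drop 4).length : Int)
              then (((((c :: rest).drop 4).length : Int) - 0 + 4 - 1) / 4).toNat else 0)
              = ((c :: rest).length + 3) / 4 - 1 := by
            have hd : ((c :: rest).drop 4).length = (c :: rest).length - 4 := by simp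
            split_ifs with h <;> omega
          rw [h2] at hrec
          rw [← hrec]
          apply List.map_congr_left
          intro k _
          show PySem.List.slice (c :: rest) (some ((0:Int) + 4 * ((Nat.succ k : Nat):Int)))
              (some ((0:Int) + 4 * ((Nat.succ k : Nat):Int) + 4))
            = PySem.List.slice ((c :: rest).drop 4) (some ((0:Int) + 4 * ((k:Nat):Int)))
              (some ((0:Int) + 4 * ((k:Nat):Int) + 4))
          have e1 : (0:Int) + 4 * ((Nat.succ k : Nat):Int) = ((4 * k + 4 : Nat):Int) := by
            push_cast; ring
          have e2 : (0:Int) + 4 * ((Nat.succ k : Nat):Int) + 4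
              = ((4 * k + 4 : Nat):Int) + ((4:Nat):Int) := by push_cast; ring
          have e3 : (0:Int) + 4 * ((k:Nat):Int) = ((4 * k : Nat):Int) := by push_cast; ring
          have e4 : (0:Int) + 4 * ((k:Nat):Int) + 4 = ((4 * k : Nat):Int) + ((4:Nat):Int) := by
            push_cast; ring
          rw [e2, e1, e4, e3, PySem.List.slice_natCast_add, PySem.List.slice_natCast_add,
            List.drop_drop, Nat.add_comm (4 * k) 4]

-- the common bit string, on the character-list side
theorem pvBits (inpt : List Int) :
    (PySem.Str.join "" (inpt.map (fun x => if x ≠ 0 then "1" else "0"))).toList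
      = inpt.map pvBit := by
  rw [PySem.Str.toList_join]
  have hmm : (inpt.map (fun x => if x ≠ 0 then "1" else "0")).map String.toList
      = (inpt.map pvBit).map (fun c => [c]) := by
    rw [List.map_map, List.map_map]
    apply List.map_congr_left
    intro x _
    by_cases h : x = 0 <;> simp [pvBit, h]
  rw [hmm]
  simpa using PySem.Chars.join_nil_singletons (inpt.map pvBit)

-- ===== VERDICT (by name: the statement is the Claim_ definition above) =====
theorem bit2str_spec : Claim_equal_bit2str := by
  unfold Claim_equal_bit2str
  intro inpt points _
  unfold Spec_bit2str bit2str bit2str_alt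
  cases points with
  | false => simp
  | true =>
      simp only [Bool.not_true, if_neg (by simp : ¬ (false = true))]
      apply String.ext
      have hA : (PySem.List.pyRange 0 (PySem.List.len inpt) 1).foldl
            (fun bitstring i =>
              let bitstring := if 0 < i ∧ PySem.Int.mod i 4 = 0 then bitstring ++ "." else bitstring
              if PySem.List.pyGetD inpt i 0 ≠ 0 then bitstring ++ "1" else bitstring ++ "0")
            ""
          = (PySem.List.enumerate inpt 0).foldl pvF "" := by
        rw [PySem.List.enumerate_eq_map_pyRange inpt 0, List.foldl_map]
        rfl
      rw [hA, pvFoldA inpt 0 ""]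
      set s := PySem.Str.join "" (inpt.map (fun x => if x ≠ 0 then "1" else "0")) with hs
      rw [PySem.Str.toList_join]
      have hslice : ((PySem.List.pyRange 0 (PySem.Str.len s) 4).map
            (fun i => PySem.Str.slice s (some i) (some (i + 4)))).map String.toList
          = (PySem.List.pyRange 0 (s.toList.length : Int) 4).map
            (fun i => PySem.List.slice s.toList (some i) (some (i + 4))) := by
        rw [List.map_map]
        have hlen : PySem.Str.len s = (s.toList.length : Int) := by
          simp [PySem.Str.len]
        rw [hlen]
        apply List.map_congr_left
        intro i _
        simp [PySem.Str.toList_slice]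
      rw [hslice, pvSlices s.toList.length s.toList le_rfl]
      rw [show ("." : String).toList = ['.'] from rfl]
      rw [hs, pvBits inpt, ← pvD_zero]
      simp
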